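-- pv_equiv track=rewrite | github.com/koba925/alds | aoj/DSL/5_B.py | solve
-- ===== SOURCE A (Python) =====
-- MAXPOS = 1000
--
-- def solve(n, rects):
--     coords = [[0] * (MAXPOS + 1) for _ in range(MAXPOS + 1)]
--     for x1, y1, x2, y2 in rects:
--         coords[y1][x1] += 1
--         coords[y1][x2] -= 1
--         coords[y2][x1] -= 1
--         coords[y2][x2] += 1
--
--     for y in range(MAXPOS):
--         for x in range(1, MAXPOS + 1):
--             coords[y][x] += coords[y][x - 1]
--
--     for y in range(1, MAXPOS + 1):
--         for x in range(MAXPOS):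
--             coords[y][x] += coords[y - 1][x]
--
--     return max(max(xs) for xs in coords)
-- ===== SOURCE B (Python) =====
-- MAXPOS = 1000
--
-- def solve(n, rects):
--     events = [[] for _ in range(MAXPOS + 1)]
--     for x1, y1, x2, y2 in rects:
--         events[x1].append((y1, y2, 1))
--         events[x2].append((y1, y2, -1))
--     ydiff = [0] * (MAXPOS + 1)
--     best = 0
--     for x in range(MAXPOS):
--         for y1, y2, s in events[x]:
--             ydiff[y1] += s
--             ydiff[y2] -= s
--         cov = 0
--         for y in range(MAXPOS):
--             cov += ydiff[y]
--             if cov > best: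
--                 best = cov
--     return best
-- ===== Notes on version B (the rewrite author's own statement) =====
-- stated objective: faster
-- what changed: Replaces the 2D corner-difference grid with its two in-place prefix-sum passes and full-grid max by a left-to-right sweep over x that keeps a 1D y-difference array updated from per-column rectangle enter/leave event lists and tracks the running maximum while prefix-summing each column.
import Mathlib
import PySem

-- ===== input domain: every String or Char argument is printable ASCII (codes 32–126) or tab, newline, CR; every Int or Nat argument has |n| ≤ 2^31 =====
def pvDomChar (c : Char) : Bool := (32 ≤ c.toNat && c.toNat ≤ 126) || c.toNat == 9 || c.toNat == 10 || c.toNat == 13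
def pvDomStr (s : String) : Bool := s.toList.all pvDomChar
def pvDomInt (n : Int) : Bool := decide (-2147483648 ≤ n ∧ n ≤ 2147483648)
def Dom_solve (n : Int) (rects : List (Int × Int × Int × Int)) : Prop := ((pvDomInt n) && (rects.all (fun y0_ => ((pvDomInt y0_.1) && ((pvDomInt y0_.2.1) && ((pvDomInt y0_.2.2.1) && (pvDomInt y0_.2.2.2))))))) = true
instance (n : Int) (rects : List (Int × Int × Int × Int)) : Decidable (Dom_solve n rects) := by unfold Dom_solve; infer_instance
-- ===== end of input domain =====

-- B replaces A's 2D corner-difference grid and two prefix-sum passes by an x-sweep with a 1D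
-- y-difference array fed by per-column enter/leave events; equal return value proved on Pre_solve.

-- ===== PORT A =====
-- Python list index into a length-1001 list: negative indices wrap (exact for -1001 ≤ i ≤ 1000,
-- which Pre_solve guarantees; out-of-range indices raise IndexError in Python and are excluded).
def pyIdx1001 (i : Int) : Nat := (if i < 0 then i + 1001 else i).toNat

-- coords[y][x] = f(coords[y][x]) / coords[y][x] = v: the row is swapped out, updated and put
-- back (the same single-cell grid update as modifying the row in place; the swap keeps the row
-- uniquely referenced so the interpreter updates it in place instead of copying it).
def gridModify (g : Array (Array Int)) (y x : ℕ) (f : Int → Int) : Array (Array Int) :=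
  let row := g[y]!
  let g := g.set! y #[]
  g.set! y (row.modify x f)

def gridSet (g : Array (Array Int)) (y x : ℕ) (v : Int) : Array (Array Int) :=
  let row := g[y]!
  let g := g.set! y #[]
  g.set! y (row.set! x v)

-- coords[y1][x1] += 1; coords[y1][x2] -= 1; coords[y2][x1] -= 1; coords[y2][x2] += 1 for each rect
def aMark (rects : List (Int × Int × Int × Int)) : Array (Array Int) :=
  rects.foldl (fun g r =>
    let g := gridModify g (pyIdx1001 r.2.1) (pyIdx1001 r.1) (fun v => v + 1)
    let g := gridModify g (pyIdx1001 r.2.1) (pyIdx1001 r.2.2.1) (fun v => v - 1)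
    let g := gridModify g (pyIdx1001 r.2.2.2) (pyIdx1001 r.1) (fun v => v - 1)
    gridModify g (pyIdx1001 r.2.2.2) (pyIdx1001 r.2.2.1) (fun v => v + 1))
    (Array.replicate 1001 (Array.replicate 1001 (0 : Int)))

-- for y in range(1000): for x in range(1, 1001): coords[y][x] += coords[y][x-1]
def aPass1 (g0 : Array (Array Int)) : Array (Array Int) :=
  (PySem.List.pyRange 0 1000 1).foldl (fun g y =>
    (PySem.List.pyRange 1 1001 1).foldl (fun g x =>
      gridSet g y.toNat x.toNat ((g[y.toNat]!)[x.toNat]! + (g[y.toNat]!)[x.toNat - 1]!)) g) g0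

-- for y in range(1, 1001): for x in range(1000): coords[y][x] += coords[y-1][x]
def aPass2 (g0 : Array (Array Int)) : Array (Array Int) :=
  (PySem.List.pyRange 1 1001 1).foldl (fun g y =>
    (PySem.List.pyRange 0 1000 1).foldl (fun g x =>
      gridSet g y.toNat x.toNat ((g[y.toNat]!)[x.toNat]! + (g[y.toNat - 1]!)[x.toNat]!)) g) g0

-- max(max(xs) for xs in coords); every row is nonempty (length 1001) so max? is some and getD 0 never fires
def aMax (g : Array (Array Int)) : Int :=
  (PySem.List.max? (g.toList.map (fun row => (PySem.List.max? row.toList (fun v => v)).getD 0)) (fun v => v)).getD 0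

def solve (n : Int) (rects : List (Int × Int × Int × Int)) : Int :=
  aMax (aPass2 (aPass1 (aMark rects)))

-- ===== PORT B =====
-- events[x1].append((y1, y2, 1)); events[x2].append((y1, y2, -1)) for each rect
def bEvents (rects : List (Int × Int × Int × Int)) : Array (List (Int × Int × Int)) :=
  rects.foldl (fun ev r =>
    let ev := ev.modify (pyIdx1001 r.1) (fun l => l ++ [(r.2.1, r.2.2.2, (1 : Int))])
    ev.modify (pyIdx1001 r.2.2.1) (fun l => l ++ [(r.2.1, r.2.2.2, (-1 : Int))]))
    (Array.replicate 1001 ([] : List (Int × Int × Int)))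

-- apply one column's events: ydiff[y1] += s; ydiff[y2] -= s
def bApply (es : List (Int × Int × Int)) (yd : Array Int) : Array Int :=
  es.foldl (fun yd e =>
    (yd.modify (pyIdx1001 e.1) (fun v => v + e.2.2)).modify (pyIdx1001 e.2.1) (fun v => v - e.2.2)) yd

-- cov = 0; for y in range(1000): cov += ydiff[y]; best = max(best, cov)
def bScan (yd : Array Int) (best : Int) : Int × Int :=
  (PySem.List.pyRange 0 1000 1).foldl (fun (p : Int × Int) y =>
    let cov := p.1 + yd[y.toNat]!
    (cov, if p.2 < cov then cov else p.2)) (0, best)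

def solve_alt (n : Int) (rects : List (Int × Int × Int × Int)) : Int :=
  let events := bEvents rects
  let final := (PySem.List.pyRange 0 1000 1).foldl (fun (st : Array Int × Int) x =>
    let ydiff := bApply (events[x.toNat]!) st.1
    (ydiff, (bScan ydiff st.2).2)) (Array.replicate 1001 (0 : Int), 0)
  final.2

-- ===== PRECONDITION & SPEC =====
-- Pre_solve: every rectangle coordinate lies in -1001 … 1000 — exactly the inputs on which
-- Python A returns (outside this range A raises IndexError on its 1001×1001 grid lists).
def Pre_solve (n : Int) (rects : List (Int × Int × Int × Int)) : Prop :=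
  ∀ r ∈ rects, (-1001 ≤ r.1 ∧ r.1 ≤ 1000) ∧ (-1001 ≤ r.2.1 ∧ r.2.1 ≤ 1000) ∧
    (-1001 ≤ r.2.2.1 ∧ r.2.2.1 ≤ 1000) ∧ (-1001 ≤ r.2.2.2 ∧ r.2.2.2 ≤ 1000)
instance (n : Int) (rects : List (Int × Int × Int × Int)) : Decidable (Pre_solve n rects) := by
  unfold Pre_solve; infer_instance

def pvWitness_solve : Int × (List (Int × Int × Int × Int)) := (1, [(0, 0, 2, 2), (1, 1, 3, 3)])

def Spec_solve (n : Int) (rects : List (Int × Int × Int × Int)) (out : Int) : Prop := out = solve_alt n rects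
instance (n : Int) (rects : List (Int × Int × Int × Int)) (out : Int) : Decidable (Spec_solve n rects out) := by unfold Spec_solve; infer_instance

-- ===== CLAIM (what is proved, stated in full; the proofs are below) =====
def Claim_equal_solve : Prop := ∀ (n : Int) (rects : List (Int × Int × Int × Int)), Dom_solve n rects → Pre_solve n rects → Spec_solve n rects (solve n rects)

-- ===== LEMMAS AND PROOFS =====

-- ---- generic array access lemmas ----

theorem pvGet!_modify {α : Type} [Inhabited α] (a : Array α) (i j : ℕ) (f : α → α)
    (hj : j < a.size) : (a.modify i f)[j]! = if i = j then f a[j]! else a[j]! := by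
  have hj' : j < (a.modify i f).size := by simpa using hj
  rw [getElem!_pos (a.modify i f) j hj', Array.getElem_modify, getElem!_pos a j hj]

theorem pvGet!_set! {α : Type} [Inhabited α] (a : Array α) (i j : ℕ) (v : α)
    (hj : j < a.size) : (a.set! i v)[j]! = if i = j then v else a[j]! := by
  have hj' : j < (a.set! i v).size := by simpa using hj
  show (a.setIfInBounds i v)[j]! = _
  rw [getElem!_pos (a.setIfInBounds i v) j (by simpa using hj), Array.getElem_setIfInBounds,
    getElem!_pos a j hj]

theorem pvGet!_replicate {α : Type} [Inhabited α] (n j : ℕ) (v : α) (hj : j < n) :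
    (Array.replicate n v)[j]! = v := by
  rw [getElem!_pos (Array.replicate n v) j (by simpa using hj)]; simp

-- ---- common arithmetic helpers ----

theorem pvSum_ite_eq_range (n a : ℕ) (c : Int) :
    (∑ j ∈ Finset.range n, if j = a then c else 0) = if a < n then c else 0 := by
  rw [Finset.sum_ite_eq']; simp

-- index bound coming from Pre_solve
def Bnd (rects : List (Int × Int × Int × Int)) : Prop :=
  ∀ r ∈ rects, pyIdx1001 r.1 ≤ 1000 ∧ pyIdx1001 r.2.1 ≤ 1000 ∧
    pyIdx1001 r.2.2.1 ≤ 1000 ∧ pyIdx1001 r.2.2.2 ≤ 1000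

theorem pre_bnd (n : Int) (rects : List (Int × Int × Int × Int)) (h : Pre_solve n rects) :
    Bnd rects := by
  intro r hr
  obtain ⟨h1, h2, h3, h4⟩ := h r hr
  refine ⟨?_, ?_, ?_, ?_⟩ <;> · unfold pyIdx1001; split <;> omega

-- ---- the common value both programs compute ----

def phiX (r : Int × Int × Int × Int) (x : ℕ) : Int :=
  (if pyIdx1001 r.1 ≤ x then 1 else 0) - (if pyIdx1001 r.2.2.1 ≤ x then 1 else 0)
def phiY (r : Int × Int × Int × Int) (y : ℕ) : Int :=
  (if pyIdx1001 r.2.1 ≤ y then 1 else 0) - (if pyIdx1001 r.2.2.2 ≤ y then 1 else 0)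
def Cov (rects : List (Int × Int × Int × Int)) (x y : ℕ) : Int :=
  (rects.map (fun r => phiX r x * phiY r y)).sum

def IsAns (rects : List (Int × Int × Int × Int)) (res : Int) : Prop :=
  0 ≤ res ∧ (∀ x y : ℕ, x < 1000 → y < 1000 → Cov rects x y ≤ res) ∧
    (res = 0 ∨ ∃ x y : ℕ, x < 1000 ∧ y < 1000 ∧ res = Cov rects x y)

theorem IsAns_unique (rects : List (Int × Int × Int × Int)) (a b : Int)
    (ha : IsAns rects a) (hb : IsAns rects b) : a = b := by
  obtain ⟨ha0, haub, hamem⟩ := ha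
  obtain ⟨hb0, hbub, hbmem⟩ := hb
  have h1 : a ≤ b := by
    rcases hamem with h | ⟨x, y, hx, hy, rfl⟩
    · omega
    · exact hbub x y hx hy
  have h2 : b ≤ a := by
    rcases hbmem with h | ⟨x, y, hx, hy, rfl⟩
    · omega
    · exact haub x y hx hy
  omega

-- ========================= B SIDE =========================

def eY (r : Int × Int × Int × Int) (j : ℕ) : Int :=
  (if j = pyIdx1001 r.2.1 then 1 else 0) - (if j = pyIdx1001 r.2.2.2 then 1 else 0)

def ydG (rects : List (Int × Int × Int × Int)) (m j : ℕ) : Int :=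
  (rects.map (fun r =>
    ((if pyIdx1001 r.1 < m then (1:Int) else 0) - (if pyIdx1001 r.2.2.1 < m then 1 else 0)) * eY r j)).sum

def evF (rects : List (Int × Int × Int × Int)) (i : ℕ) : List (Int × Int × Int) :=
  rects.flatMap (fun r =>
    (if i = pyIdx1001 r.1 then [(r.2.1, r.2.2.2, (1:Int))] else []) ++
    (if i = pyIdx1001 r.2.2.1 then [(r.2.1, r.2.2.2, (-1:Int))] else []))

def EvEq (ev : Array (List (Int × Int × Int))) (h : ℕ → List (Int × Int × Int)) : Prop :=
  ev.size = 1001 ∧ ∀ i : ℕ, i < 1001 → ev[i]! = h i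

theorem EvEq_mod (ev : Array (List (Int × Int × Int))) (h : ℕ → List (Int × Int × Int))
    (i0 : ℕ) (L : List (Int × Int × Int)) (hi : i0 < 1001) (H : EvEq ev h) :
    EvEq (ev.modify i0 (fun l => l ++ L)) (fun i => if i = i0 then h i ++ L else h i) := by
  obtain ⟨hs, hc⟩ := H
  refine ⟨by simpa using hs, ?_⟩
  intro i hi'
  rw [pvGet!_modify _ _ _ _ (by omega)]
  rcases eq_or_ne i0 i with rfl | hne
  · simp [hc i0 hi']
  · simp [hne, Ne.symm hne, hc i hi']

theorem events_build_aux (t : List (Int × Int × Int × Int)) (hb : Bnd t)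
    (ev : Array (List (Int × Int × Int))) (h : ℕ → List (Int × Int × Int)) (H : EvEq ev h) :
    EvEq (t.foldl (fun ev r =>
      (ev.modify (pyIdx1001 r.1) (fun l => l ++ [(r.2.1, r.2.2.2, (1 : Int))])).modify
        (pyIdx1001 r.2.2.1) (fun l => l ++ [(r.2.1, r.2.2.2, (-1 : Int))])) ev)
      (fun i => h i ++ evF t i) := by
  induction t generalizing ev h with
  | nil => exact ⟨H.1, fun i hi => by simpa [evF] using H.2 i hi⟩
  | cons r t ih =>
    have hbr := hb r (List.mem_cons_self ..)
    have hbt : Bnd t := fun r' hr' => hb r' (List.mem_cons_of_mem _ hr')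
    rw [List.foldl_cons]
    have H1 := EvEq_mod ev h (pyIdx1001 r.1) [(r.2.1, r.2.2.2, (1:Int))] (by omega) H
    have H2 := EvEq_mod _ _ (pyIdx1001 r.2.2.1) [(r.2.1, r.2.2.2, (-1:Int))] (by omega) H1
    have H3 := ih hbt _ _ H2
    refine ⟨H3.1, fun i hi => ?_⟩
    rw [H3.2 i hi]
    simp only [evF, List.flatMap_cons]
    by_cases h1 : i = pyIdx1001 r.1 <;> by_cases h2 : i = pyIdx1001 r.2.2.1
    · have h12 : pyIdx1001 r.1 = pyIdx1001 r.2.2.1 := by rw [← h1, ← h2]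
      simp [h1, h2, h12, evF]
    · have h12 : pyIdx1001 r.1 ≠ pyIdx1001 r.2.2.1 := fun hh => h2 (h1.trans hh)
      simp [h1, h2, h12, evF]
    · have h12 : pyIdx1001 r.2.2.1 ≠ pyIdx1001 r.1 := fun hh => h1 (h2.trans hh)
      simp [h1, h2, h12, evF]
    · simp [h1, h2, evF]

def YEq (yd : Array Int) (u : ℕ → Int) : Prop :=
  yd.size = 1001 ∧ ∀ j : ℕ, j < 1001 → yd[j]! = u j

theorem YEq_congr (yd : Array Int) (u u' : ℕ → Int) (H : YEq yd u)
    (h : ∀ j : ℕ, j < 1001 → u j = u' j) : YEq yd u' :=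
  ⟨H.1, fun j hj => (H.2 j hj).trans (h j hj)⟩

def contrib (e : Int × Int × Int) (j : ℕ) : Int :=
  (if j = pyIdx1001 e.1 then e.2.2 else 0) - (if j = pyIdx1001 e.2.1 then e.2.2 else 0)

theorem apply_chr (L : List (Int × Int × Int))
    (hL : ∀ e ∈ L, pyIdx1001 e.1 ≤ 1000 ∧ pyIdx1001 e.2.1 ≤ 1000)
    (yd : Array Int) (u : ℕ → Int) (H : YEq yd u) :
    YEq (bApply L yd) (fun j => u j + (L.map (fun e => contrib e j)).sum) := by
  induction L generalizing yd u with
  | nil => exact YEq_congr _ _ _ H (by intro j hj; simp)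
  | cons e t ih =>
    have he := hL e (List.mem_cons_self ..)
    have ht : ∀ e' ∈ t, pyIdx1001 e'.1 ≤ 1000 ∧ pyIdx1001 e'.2.1 ≤ 1000 :=
      fun e' he' => hL e' (List.mem_cons_of_mem _ he')
    have hstep : YEq ((yd.modify (pyIdx1001 e.1) (fun v => v + e.2.2)).modify
        (pyIdx1001 e.2.1) (fun v => v - e.2.2)) (fun j => u j + contrib e j) := by
      obtain ⟨hs, hc⟩ := H
      have hs1 : (yd.modify (pyIdx1001 e.1) (fun v => v + e.2.2)).size = 1001 := by simpa using hs
      refine ⟨by simpa using hs1, ?_⟩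
      intro j hj
      beta_reduce
      rw [pvGet!_modify _ _ _ _ (by omega), pvGet!_modify _ _ _ _ (by omega)]
      unfold contrib
      rw [hc j hj]
      split_ifs <;> omega
    have hih := ih ht _ _ hstep
    refine YEq_congr _ _ _ hih ?_
    intro j hj
    simp only [List.map_cons, List.sum_cons]
    ring

theorem evF_bound (rects : List (Int × Int × Int × Int)) (hb : Bnd rects) (i : ℕ) :
    ∀ e ∈ evF rects i, pyIdx1001 e.1 ≤ 1000 ∧ pyIdx1001 e.2.1 ≤ 1000 := by
  intro e he
  obtain ⟨r, hr, hmem⟩ := List.mem_flatMap.mp he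
  have hbr := hb r hr
  rcases List.mem_append.mp hmem with h | h <;>
    · split at h <;> simp_all

theorem bucket_sum (rects : List (Int × Int × Int × Int)) (i j : ℕ) :
    ((evF rects i).map (fun e => contrib e j)).sum =
      (rects.map (fun r =>
        ((if i = pyIdx1001 r.1 then (1:Int) else 0) - (if i = pyIdx1001 r.2.2.1 then 1 else 0)) * eY r j)).sum := by
  induction rects with
  | nil => simp [evF]
  | cons r t ih =>
    simp only [evF, List.flatMap_cons, List.map_append, List.sum_append, List.map_cons,
      List.sum_cons]
    rw [show (List.flatMap _ t).map (fun e => contrib e j) = (evF t i).map (fun e => contrib e j) from rfl]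
    rw [ih]
    by_cases h1 : i = pyIdx1001 r.1 <;> by_cases h2 : i = pyIdx1001 r.2.2.1
    · have h12 : pyIdx1001 r.1 = pyIdx1001 r.2.2.1 := by rw [← h1, ← h2]
      simp [h1, h2, h12, contrib, eY]
      split_ifs <;> omega
    · have h12 : ¬ pyIdx1001 r.1 = pyIdx1001 r.2.2.1 := fun hh => h2 (h1.trans hh)
      simp [h1, h2, h12, contrib, eY]
      try split_ifs <;> omega
    · have h12 : ¬ pyIdx1001 r.2.2.1 = pyIdx1001 r.1 := fun hh => h1 (h2.trans hh)
      simp [h1, h2, h12, contrib, eY]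
      try split_ifs <;> omega
    · simp [h1, h2, contrib, eY]

theorem ydG_zero (rects : List (Int × Int × Int × Int)) (j : ℕ) : ydG rects 0 j = 0 := by
  induction rects with
  | nil => simp [ydG]
  | cons r t ih => simp only [ydG, List.map_cons, List.sum_cons] at *; simp [ih]

theorem ydG_succ (rects : List (Int × Int × Int × Int)) (m j : ℕ) :
    ydG rects (m + 1) j = ydG rects m j +
      (rects.map (fun r =>
        ((if m = pyIdx1001 r.1 then (1:Int) else 0) - (if m = pyIdx1001 r.2.2.1 then 1 else 0)) * eY r j)).sum := by
  induction rects with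
  | nil => simp [ydG]
  | cons r t ih =>
    simp only [ydG, List.map_cons, List.sum_cons] at *
    rw [ih]
    have e1 : (if pyIdx1001 r.1 < m + 1 then (1:Int) else 0) =
        (if pyIdx1001 r.1 < m then (1:Int) else 0) + (if m = pyIdx1001 r.1 then 1 else 0) := by
      split_ifs <;> omega
    have e2 : (if pyIdx1001 r.2.2.1 < m + 1 then (1:Int) else 0) =
        (if pyIdx1001 r.2.2.1 < m then (1:Int) else 0) + (if m = pyIdx1001 r.2.2.1 then 1 else 0) := by
      split_ifs <;> omega
    rw [e1, e2]; ring

def psum (u : ℕ → Int) (k : ℕ) : Int := ∑ j ∈ Finset.range k, u j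

theorem psum_ydG (rects : List (Int × Int × Int × Int)) (x y : ℕ) :
    psum (ydG rects (x + 1)) (y + 1) = Cov rects x y := by
  induction rects with
  | nil => simp [psum, ydG, Cov]
  | cons r t ih =>
    have hsplit : ∀ k : ℕ, psum (ydG (r :: t) (x+1)) k = psum (fun j =>
        ((if pyIdx1001 r.1 < x+1 then (1:Int) else 0) - (if pyIdx1001 r.2.2.1 < x+1 then 1 else 0)) * eY r j) k
        + psum (ydG t (x+1)) k := by
      intro k
      unfold psum
      rw [← Finset.sum_add_distrib]
      exact Finset.sum_congr rfl (fun j _ => by simp [ydG, List.map_cons, List.sum_cons])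
    rw [hsplit, ih]
    have heY : psum (fun j => ((if pyIdx1001 r.1 < x+1 then (1:Int) else 0) -
        (if pyIdx1001 r.2.2.1 < x+1 then 1 else 0)) * eY r j) (y+1) =
        ((if pyIdx1001 r.1 < x+1 then (1:Int) else 0) - (if pyIdx1001 r.2.2.1 < x+1 then 1 else 0)) *
          ((if pyIdx1001 r.2.1 < y+1 then (1:Int) else 0) - (if pyIdx1001 r.2.2.2 < y+1 then 1 else 0)) := by
      unfold psum
      rw [← Finset.mul_sum]
      congr 1
      unfold eY
      rw [Finset.sum_sub_distrib, pvSum_ite_eq_range, pvSum_ite_eq_range]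
    rw [heY]
    simp only [Cov, List.map_cons, List.sum_cons]
    have hlt : ∀ a b : ℕ, (if a < b+1 then (1:Int) else 0) = (if a ≤ b then 1 else 0) := by
      intro a b; split_ifs <;> omega
    simp only [phiX, phiY, hlt]

theorem events_build (rects : List (Int × Int × Int × Int)) (hb : Bnd rects) :
    EvEq (bEvents rects) (evF rects) := by
  have hinit : EvEq (Array.replicate 1001 ([] : List (Int × Int × Int))) (fun _ => []) :=
    ⟨by simp, fun i hi => pvGet!_replicate _ _ _ hi⟩
  have := events_build_aux rects hb _ _ hinit
  exact ⟨this.1, fun i hi => by simpa using this.2 i hi⟩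

theorem scan_chr (yd : Array Int) (u : ℕ → Int) (H : YEq yd u) (best : Int) :
    ∀ k : ℕ, k ≤ 1000 →
      ∃ b : Int, ((PySem.List.pyRange 0 (k:Int) 1).foldl (fun (p : Int × Int) y =>
          let cov := p.1 + yd[y.toNat]!
          (cov, if p.2 < cov then cov else p.2)) (0, best))
        = (psum u k, b) ∧ best ≤ b ∧ (∀ y : ℕ, y < k → psum u (y+1) ≤ b) ∧
          (b = best ∨ ∃ y : ℕ, y < k ∧ b = psum u (y+1)) := by
  intro k
  induction k with
  | zero =>
    intro _
    refine ⟨best, ?_, le_refl _, by omega, Or.inl rfl⟩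
    rw [PySem.List.pyRange_one_eq_nil (by norm_num)]
    simp [psum]
  | succ k ih =>
    intro hk
    obtain ⟨b, heq, hle, hub, hmem⟩ := ih (by omega)
    have hsplit : PySem.List.pyRange 0 ((k+1 : ℕ):Int) 1 =
        PySem.List.pyRange 0 (k:Int) 1 ++ [(k:Int)] := by
      push_cast
      exact PySem.List.pyRange_one_succ_right (by positivity)
    rw [hsplit, List.foldl_append, heq]
    have hyd : yd[((k:Int)).toNat]! = u k := by
      have := H.2 k (by omega)
      simpa using this
    have hps : psum u (k+1) = psum u k + u k := by
      simp [psum, Finset.sum_range_succ]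
    by_cases hbc : b < psum u k + yd[((k:Int)).toNat]!
    · refine ⟨psum u k + u k, ?_, by omega, ?_, ?_⟩
      · simp only [List.foldl_cons, List.foldl_nil]
        rw [if_pos hbc, hyd, hps]
      · intro y hy
        rcases Nat.lt_succ_iff_lt_or_eq.mp hy with h | h
        · have := hub y h; rw [hyd] at hbc; omega
        · subst h; omega
      · exact Or.inr ⟨k, by omega, hps.symm⟩
    · refine ⟨b, ?_, hle, ?_, ?_⟩
      · simp only [List.foldl_cons, List.foldl_nil]
        rw [if_neg hbc, hyd, hps]
      · intro y hy
        rcases Nat.lt_succ_iff_lt_or_eq.mp hy with h | h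
        · exact hub y h
        · subst h; rw [hyd] at hbc; omega
      · rcases hmem with h | ⟨y, hy, h⟩
        · exact Or.inl h
        · exact Or.inr ⟨y, by omega, h⟩

theorem sweep_chr (rects : List (Int × Int × Int × Int)) (hb : Bnd rects) :
    ∀ m : ℕ, m ≤ 1000 → ∃ (yd : Array Int) (b : Int),
      ((PySem.List.pyRange 0 (m:Int) 1).foldl (fun (st : Array Int × Int) x =>
          let ydiff := bApply ((bEvents rects)[x.toNat]!) st.1
          (ydiff, (bScan ydiff st.2).2)) (Array.replicate 1001 (0:Int), 0))
        = (yd, b) ∧ YEq yd (ydG rects m) ∧ 0 ≤ b ∧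
          (∀ x y : ℕ, x < m → y < 1000 → Cov rects x y ≤ b) ∧
          (b = 0 ∨ ∃ x y : ℕ, x < m ∧ y < 1000 ∧ b = Cov rects x y) := by
  intro m
  induction m with
  | zero =>
    intro _
    refine ⟨Array.replicate 1001 (0:Int), 0, ?_, ?_, le_refl _, by omega, Or.inl rfl⟩
    · rw [show ((0:ℕ):Int) = (0:Int) by norm_num, PySem.List.pyRange_one_eq_nil (by norm_num)]
      rfl
    · exact ⟨by simp, fun j hj => by rw [pvGet!_replicate _ _ _ hj, ydG_zero]⟩
  | succ m ih =>
    intro hm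
    obtain ⟨yd, b, heq, hyd, hb0, hub, hmem⟩ := ih (by omega)
    have hsplit : PySem.List.pyRange 0 ((m+1 : ℕ):Int) 1 =
        PySem.List.pyRange 0 (m:Int) 1 ++ [(m:Int)] := by
      push_cast
      exact PySem.List.pyRange_one_succ_right (by positivity)
    rw [hsplit, List.foldl_append, heq]
    simp only [List.foldl_cons, List.foldl_nil]
    have hEv := events_build rects hb
    have hbucket : (bEvents rects)[((m:Int)).toNat]! = evF rects m := by
      have := hEv.2 m (by omega)
      simpa using this
    rw [hbucket]
    have happ := apply_chr (evF rects m) (evF_bound rects hb m) yd (ydG rects m) hyd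
    have hnew : YEq (bApply (evF rects m) yd) (ydG rects (m+1)) := by
      refine YEq_congr _ _ _ happ ?_
      intro j hj
      rw [bucket_sum, ← ydG_succ]
    obtain ⟨b', hseq, hble, hsub, hsmem⟩ := scan_chr (bApply (evF rects m) yd) (ydG rects (m+1)) hnew b 1000 (le_refl _)
    have hscan : (bScan (bApply (evF rects m) yd) b).2 = b' := by
      unfold bScan
      rw [show (1000:Int) = ((1000:ℕ):Int) by norm_num, hseq]
    refine ⟨bApply (evF rects m) yd, b', by rw [hscan], hnew, by omega, ?_, ?_⟩
    · intro x y hx hy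
      rcases Nat.lt_succ_iff_lt_or_eq.mp hx with h | h
      · exact le_trans (hub x y h hy) hble
      · subst h
        have := hsub y hy
        rwa [psum_ydG] at this
    · rcases hsmem with h | ⟨y, hy, h⟩
      · subst h
        rcases hmem with h | ⟨x, y, hx, hy, h⟩
        · exact Or.inl h
        · exact Or.inr ⟨x, y, by omega, hy, h⟩
      · rw [psum_ydG] at h
        exact Or.inr ⟨m, y, by omega, hy, h⟩

theorem B_isAns (n : Int) (rects : List (Int × Int × Int × Int)) (hb : Bnd rects) :
    IsAns rects (solve_alt n rects) := by
  obtain ⟨yd, b, heq, _, h0, hub, hmem⟩ := sweep_chr rects hb 1000 (le_refl _)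
  have hval : solve_alt n rects = b := by
    have : solve_alt n rects = ((PySem.List.pyRange 0 ((1000:ℕ):Int) 1).foldl
        (fun (st : Array Int × Int) x =>
          let ydiff := bApply ((bEvents rects)[x.toNat]!) st.1
          (ydiff, (bScan ydiff st.2).2)) (Array.replicate 1001 (0:Int), 0)).2 := by
      rfl
    rw [this, heq]
  rw [hval]
  exact ⟨h0, hub, hmem⟩

-- ========================= A SIDE =========================

def GEq (g : Array (Array Int)) (f : ℕ → ℕ → Int) : Prop :=
  g.size = 1001 ∧ ∀ y : ℕ, y < 1001 →
    (g[y]!).size = 1001 ∧ ∀ x : ℕ, x < 1001 → (g[y]!)[x]! = f y x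

theorem GEq_congr (g : Array (Array Int)) (f f' : ℕ → ℕ → Int) (H : GEq g f)
    (h : ∀ y x : ℕ, y < 1001 → x < 1001 → f y x = f' y x) : GEq g f' :=
  ⟨H.1, fun y hy => ⟨(H.2 y hy).1, fun x hx => ((H.2 y hy).2 x hx).trans (h y x hy hx)⟩⟩

theorem GEq_get (g : Array (Array Int)) (f : ℕ → ℕ → Int) (H : GEq g f) (y x : ℕ)
    (hy : y < 1001) (hx : x < 1001) : (g[y]!)[x]! = f y x := (H.2 y hy).2 x hx

theorem pvGet!_set2 {α : Type} [Inhabited α] (a : Array α) (i j : ℕ) (u v : α)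
    (hj : j < a.size) : ((a.set! i u).set! i v)[j]! = if i = j then v else a[j]! := by
  rw [pvGet!_set! _ _ _ _ (by simpa using hj), pvGet!_set! _ _ _ _ hj]
  split_ifs <;> rfl

theorem GEq_gridModify (g : Array (Array Int)) (f : ℕ → ℕ → Int) (y0 x0 : ℕ) (h : Int → Int)
    (hy : y0 < 1001) (hx : x0 < 1001) (H : GEq g f) :
    GEq (gridModify g y0 x0 h)
      (fun y x => if y = y0 ∧ x = x0 then h (f y x) else f y x) := by
  obtain ⟨hs, hc⟩ := H
  rw [show gridModify g y0 x0 h = (g.set! y0 #[]).set! y0 (g[y0]!.modify x0 h) from rfl]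
  refine ⟨by simpa using hs, ?_⟩
  intro y hy'
  rw [pvGet!_set2 _ _ _ _ _ (by omega)]
  rcases eq_or_ne y0 y with rfl | hne
  · obtain ⟨hrs, hrc⟩ := hc y0 hy'
    rw [if_pos rfl]
    refine ⟨by simpa using hrs, ?_⟩
    intro x hx'
    beta_reduce
    rw [pvGet!_modify _ _ _ _ (by omega)]
    rcases eq_or_ne x0 x with rfl | hxe
    · rw [if_pos rfl, hrc x0 hx', if_pos ⟨rfl, rfl⟩]
    · rw [if_neg hxe, hrc x hx', if_neg (fun hp => hxe hp.2.symm)]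
  · rw [if_neg hne]
    obtain ⟨hrs, hrc⟩ := hc y hy'
    exact ⟨hrs, fun x hx' => by
      beta_reduce
      rw [hrc x hx', if_neg (fun hp => hne hp.1.symm)]⟩

theorem GEq_gridSet (g : Array (Array Int)) (f : ℕ → ℕ → Int) (y0 x0 : ℕ) (v : Int)
    (hy : y0 < 1001) (hx : x0 < 1001) (H : GEq g f) :
    GEq (gridSet g y0 x0 v)
      (fun y x => if y = y0 ∧ x = x0 then v else f y x) := by
  obtain ⟨hs, hc⟩ := H
  rw [show gridSet g y0 x0 v = (g.set! y0 #[]).set! y0 (g[y0]!.set! x0 v) from rfl]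
  refine ⟨by simpa using hs, ?_⟩
  intro y hy'
  rw [pvGet!_set2 _ _ _ _ _ (by omega)]
  rcases eq_or_ne y0 y with rfl | hne
  · obtain ⟨hrs, hrc⟩ := hc y0 hy'
    rw [if_pos rfl]
    refine ⟨by simpa using hrs, ?_⟩
    intro x hx'
    beta_reduce
    rw [pvGet!_set! _ _ _ _ (by omega)]
    rcases eq_or_ne x0 x with rfl | hxe
    · rw [if_pos rfl, if_pos ⟨rfl, rfl⟩]
    · rw [if_neg hxe, hrc x hx', if_neg (fun hp => hxe hp.2.symm)]
  · rw [if_neg hne]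
    obtain ⟨hrs, hrc⟩ := hc y hy'
    exact ⟨hrs, fun x hx' => by
      beta_reduce
      rw [hrc x hx', if_neg (fun hp => hne hp.1.symm)]⟩

def dmark (r : Int × Int × Int × Int) (y x : ℕ) : Int :=
  (if y = pyIdx1001 r.2.1 ∧ x = pyIdx1001 r.1 then 1 else 0)
  - (if y = pyIdx1001 r.2.1 ∧ x = pyIdx1001 r.2.2.1 then 1 else 0)
  - (if y = pyIdx1001 r.2.2.2 ∧ x = pyIdx1001 r.1 then 1 else 0)
  + (if y = pyIdx1001 r.2.2.2 ∧ x = pyIdx1001 r.2.2.1 then 1 else 0)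

def fMark (rects : List (Int × Int × Int × Int)) (y x : ℕ) : Int :=
  (rects.map (fun r => dmark r y x)).sum

theorem mark_fold (t : List (Int × Int × Int × Int)) (hb : Bnd t)
    (g : Array (Array Int)) (f : ℕ → ℕ → Int) (H : GEq g f) :
    GEq (t.foldl (fun g r =>
      let g := gridModify g (pyIdx1001 r.2.1) (pyIdx1001 r.1) (fun v => v + 1)
      let g := gridModify g (pyIdx1001 r.2.1) (pyIdx1001 r.2.2.1) (fun v => v - 1)
      let g := gridModify g (pyIdx1001 r.2.2.2) (pyIdx1001 r.1) (fun v => v - 1)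
      gridModify g (pyIdx1001 r.2.2.2) (pyIdx1001 r.2.2.1) (fun v => v + 1)) g)
      (fun y x => f y x + fMark t y x) := by
  induction t generalizing g f with
  | nil => exact GEq_congr _ _ _ H (fun y x _ _ => by simp [fMark])
  | cons r t ih =>
    have hbr := hb r (List.mem_cons_self ..)
    have hbt : Bnd t := fun r' hr' => hb r' (List.mem_cons_of_mem _ hr')
    rw [List.foldl_cons]
    have H1 := GEq_gridModify g f (pyIdx1001 r.2.1) (pyIdx1001 r.1) (fun v => v + 1)
      (by omega) (by omega) H
    have H2 := GEq_gridModify _ _ (pyIdx1001 r.2.1) (pyIdx1001 r.2.2.1) (fun v => v - 1)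
      (by omega) (by omega) H1
    have H3 := GEq_gridModify _ _ (pyIdx1001 r.2.2.2) (pyIdx1001 r.1) (fun v => v - 1)
      (by omega) (by omega) H2
    have H4 := GEq_gridModify _ _ (pyIdx1001 r.2.2.2) (pyIdx1001 r.2.2.1) (fun v => v + 1)
      (by omega) (by omega) H3
    have H5 := ih hbt _ _ H4
    refine GEq_congr _ _ _ H5 ?_
    intro y x hy hx
    beta_reduce
    simp only [fMark, List.map_cons, List.sum_cons, dmark]
    generalize f y x = w
    split_ifs <;> omega

def pref (f : ℕ → ℕ → Int) (y x : ℕ) : Int := ∑ j ∈ Finset.range (x+1), f y j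
def colsum (h : ℕ → ℕ → Int) (y x : ℕ) : Int := ∑ i ∈ Finset.range (y+1), h i x

theorem pass1_inner (y0 : ℕ) (hy0 : y0 < 1001) (g : Array (Array Int)) (f : ℕ → ℕ → Int)
    (H : GEq g f) : ∀ k : ℕ, k ≤ 1000 →
    GEq ((PySem.List.pyRange 1 ((k:Int)+1) 1).foldl (fun g x =>
        gridSet g y0 x.toNat ((g[y0]!)[x.toNat]! + (g[y0]!)[x.toNat - 1]!)) g)
      (fun y x => if y = y0 ∧ 1 ≤ x ∧ x ≤ k then pref f y0 x else f y x) := by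
  intro k
  induction k with
  | zero =>
    intro _
    rw [show ((0:ℕ):Int)+1 = (1:Int) by norm_num, PySem.List.pyRange_one_eq_nil (by norm_num),
      List.foldl_nil]
    exact GEq_congr _ _ _ H (fun y x _ _ => by rw [if_neg (by omega)])
  | succ k ih =>
    intro hk
    have ihh := ih (by omega)
    have hsplit : PySem.List.pyRange 1 (((k+1:ℕ):Int)+1) 1 =
        PySem.List.pyRange 1 ((k:Int)+1) 1 ++ [(k:Int)+1] := by
      push_cast
      exact PySem.List.pyRange_one_succ_right (by omega)
    rw [hsplit, List.foldl_append, List.foldl_cons, List.foldl_nil]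
    have htn : ((k:Int)+1).toNat = k + 1 := by omega
    beta_reduce
    rw [htn]
    have hv1 : (((PySem.List.pyRange 1 ((k:Int)+1) 1).foldl (fun g x =>
        gridSet g y0 x.toNat ((g[y0]!)[x.toNat]! + (g[y0]!)[x.toNat - 1]!)) g)[y0]!)[k+1]!
        = f y0 (k+1) := by
      rw [GEq_get _ _ ihh y0 (k+1) hy0 (by omega)]
      beta_reduce
      rw [if_neg (by omega)]
    have hv2 : (((PySem.List.pyRange 1 ((k:Int)+1) 1).foldl (fun g x =>
        gridSet g y0 x.toNat ((g[y0]!)[x.toNat]! + (g[y0]!)[x.toNat - 1]!)) g)[y0]!)[k+1-1]!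
        = pref f y0 k := by
      rw [show k+1-1 = k from rfl, GEq_get _ _ ihh y0 k hy0 (by omega)]
      beta_reduce
      rcases Nat.eq_zero_or_pos k with rfl | hpos
      · rw [if_neg (by omega)]
        simp [pref]
      · rw [if_pos ⟨rfl, by omega, le_refl k⟩]
    rw [hv1, hv2]
    have hstep := GEq_gridSet _ _ y0 (k+1) (f y0 (k+1) + pref f y0 k)
      hy0 (by omega) ihh
    refine GEq_congr _ _ _ hstep ?_
    intro y x hy hx
    beta_reduce
    by_cases hyy : y = y0
    · subst hyy
      by_cases hxx : x = k+1
      · subst hxx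
        rw [if_pos ⟨rfl, rfl⟩, if_pos ⟨rfl, by omega, le_refl _⟩]
        simp only [pref]
        conv_rhs => rw [Finset.sum_range_succ]
        ring
      · rw [if_neg (by omega)]
        by_cases hx1 : 1 ≤ x ∧ x ≤ k
        · rw [if_pos ⟨rfl, hx1.1, hx1.2⟩, if_pos ⟨rfl, hx1.1, by omega⟩]
        · rw [if_neg (by omega), if_neg (by omega)]
    · rw [if_neg (by omega), if_neg (by omega), if_neg (by omega)]

theorem pass1_outer (g : Array (Array Int)) (f : ℕ → ℕ → Int) (H : GEq g f) :
    ∀ m : ℕ, m ≤ 1000 →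
    GEq ((PySem.List.pyRange 0 (m:Int) 1).foldl (fun g y =>
        (PySem.List.pyRange 1 1001 1).foldl (fun g x =>
          gridSet g y.toNat x.toNat ((g[y.toNat]!)[x.toNat]! + (g[y.toNat]!)[x.toNat - 1]!)) g) g)
      (fun y x => if y < m then pref f y x else f y x) := by
  intro m
  induction m with
  | zero =>
    intro _
    rw [show PySem.List.pyRange 0 ((0:ℕ):Int) 1 = ([] : List Int) from
      PySem.List.pyRange_one_eq_nil (by norm_num), List.foldl_nil]
    exact GEq_congr _ _ _ H (fun y x _ _ => by rw [if_neg (by omega)])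
  | succ m ih =>
    intro hm
    have ihh := ih (by omega)
    have hsplit : PySem.List.pyRange 0 ((m+1:ℕ):Int) 1 =
        PySem.List.pyRange 0 (m:Int) 1 ++ [(m:Int)] := by
      push_cast
      exact PySem.List.pyRange_one_succ_right (by omega)
    rw [hsplit, List.foldl_append, List.foldl_cons, List.foldl_nil]
    beta_reduce
    rw [Int.toNat_natCast]
    have hin := pass1_inner m (by omega) _ _ ihh 1000 (le_refl _)
    rw [show (((1000:ℕ)):Int)+1 = (1001:Int) by norm_num] at hin
    refine GEq_congr _ _ _ hin ?_
    intro y x hy hx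
    beta_reduce
    by_cases hyy : y = m
    · subst hyy
      by_cases hx0 : 1 ≤ x
      · rw [if_pos ⟨rfl, hx0, by omega⟩, if_pos (by omega)]
        unfold pref
        exact Finset.sum_congr rfl (fun j _ => by beta_reduce; rw [if_neg (by omega)])
      · have hx00 : x = 0 := by omega
        subst hx00
        rw [if_neg (by omega), if_neg (by omega), if_pos (by omega)]
        simp [pref]
    · rw [if_neg (by omega)]
      by_cases hylt : y < m
      · rw [if_pos hylt, if_pos (by omega)]
      · rw [if_neg hylt, if_neg (by omega)]

theorem pass2_inner (y0 : ℕ) (hy1 : 1 ≤ y0) (hy0 : y0 < 1001) (g : Array (Array Int))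
    (f : ℕ → ℕ → Int) (H : GEq g f) : ∀ k : ℕ, k ≤ 1000 →
    GEq ((PySem.List.pyRange 0 (k:Int) 1).foldl (fun g x =>
        gridSet g y0 x.toNat ((g[y0]!)[x.toNat]! + (g[y0 - 1]!)[x.toNat]!)) g)
      (fun y x => if y = y0 ∧ x < k then f y x + f (y0-1) x else f y x) := by
  intro k
  induction k with
  | zero =>
    intro _
    rw [show PySem.List.pyRange 0 ((0:ℕ):Int) 1 = ([] : List Int) from
      PySem.List.pyRange_one_eq_nil (by norm_num), List.foldl_nil]
    exact GEq_congr _ _ _ H (fun y x _ _ => by rw [if_neg (by omega)])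
  | succ k ih =>
    intro hk
    have ihh := ih (by omega)
    have hsplit : PySem.List.pyRange 0 ((k+1:ℕ):Int) 1 =
        PySem.List.pyRange 0 (k:Int) 1 ++ [(k:Int)] := by
      push_cast
      exact PySem.List.pyRange_one_succ_right (by omega)
    rw [hsplit, List.foldl_append, List.foldl_cons, List.foldl_nil]
    beta_reduce
    rw [Int.toNat_natCast]
    have hv1 : (((PySem.List.pyRange 0 (k:Int) 1).foldl (fun g x =>
        gridSet g y0 x.toNat ((g[y0]!)[x.toNat]! + (g[y0 - 1]!)[x.toNat]!)) g)[y0]!)[k]!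
        = f y0 k := by
      rw [GEq_get _ _ ihh y0 k hy0 (by omega)]
      beta_reduce
      rw [if_neg (by omega)]
    have hv2 : (((PySem.List.pyRange 0 (k:Int) 1).foldl (fun g x =>
        gridSet g y0 x.toNat ((g[y0]!)[x.toNat]! + (g[y0 - 1]!)[x.toNat]!)) g)[y0 - 1]!)[k]!
        = f (y0-1) k := by
      rw [GEq_get _ _ ihh (y0-1) k (by omega) (by omega)]
      beta_reduce
      rw [if_neg (by omega)]
    rw [hv1, hv2]
    have hstep := GEq_gridSet _ _ y0 k (f y0 k + f (y0-1) k) hy0 (by omega) ihh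
    refine GEq_congr _ _ _ hstep ?_
    intro y x hy hx
    beta_reduce
    by_cases hyy : y = y0
    · subst hyy
      by_cases hxx : x = k
      · subst hxx
        rw [if_pos ⟨rfl, rfl⟩, if_pos ⟨rfl, by omega⟩]
      · by_cases hxlt : x < k
        · rw [if_neg (by omega), if_pos ⟨rfl, hxlt⟩, if_pos ⟨rfl, by omega⟩]
        · rw [if_neg (by omega), if_neg (by omega), if_neg (by omega)]
    · rw [if_neg (by omega), if_neg (by omega), if_neg (by omega)]

theorem pass2_outer (g : Array (Array Int)) (f : ℕ → ℕ → Int) (H : GEq g f) :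
    ∀ m : ℕ, m ≤ 1000 →
    GEq ((PySem.List.pyRange 1 ((m:Int)+1) 1).foldl (fun g y =>
        (PySem.List.pyRange 0 1000 1).foldl (fun g x =>
          gridSet g y.toNat x.toNat ((g[y.toNat]!)[x.toNat]! + (g[y.toNat - 1]!)[x.toNat]!)) g) g)
      (fun y x => if x ≤ 999 ∧ y ≤ m then colsum f y x else f y x) := by
  intro m
  induction m with
  | zero =>
    intro _
    rw [show PySem.List.pyRange 1 (((0:ℕ):Int)+1) 1 = ([] : List Int) from
      PySem.List.pyRange_one_eq_nil (by norm_num), List.foldl_nil]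
    refine GEq_congr _ _ _ H (fun y x _ _ => ?_)
    by_cases hc : x ≤ 999 ∧ y ≤ 0
    · rw [if_pos hc]
      have : y = 0 := by omega
      subst this
      simp [colsum]
    · rw [if_neg hc]
  | succ m ih =>
    intro hm
    have ihh := ih (by omega)
    have hsplit : PySem.List.pyRange 1 (((m+1:ℕ):Int)+1) 1 =
        PySem.List.pyRange 1 ((m:Int)+1) 1 ++ [(m:Int)+1] := by
      push_cast
      exact PySem.List.pyRange_one_succ_right (by omega)
    rw [hsplit, List.foldl_append, List.foldl_cons, List.foldl_nil]
    beta_reduce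
    rw [show ((m:Int)+1).toNat = m+1 from by omega]
    have hin := pass2_inner (m+1) (by omega) (by omega) _ _ ihh 1000 (le_refl _)
    rw [show (((1000:ℕ)):Int) = (1000:Int) by norm_num] at hin
    refine GEq_congr _ _ _ hin ?_
    intro y x hy hx
    beta_reduce
    by_cases hyy : y = m+1
    · subst hyy
      by_cases hxx : x < 1000
      · rw [if_pos ⟨rfl, hxx⟩, if_neg (by omega), if_pos (by omega), if_pos (by omega)]
        rw [show m+1-1 = m from rfl]
        unfold colsum
        conv_rhs => rw [Finset.sum_range_succ]
        ring
      · rw [if_neg (by omega), if_neg (by omega), if_neg (by omega)]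
    · rw [if_neg (by omega)]
      by_cases hcc : x ≤ 999 ∧ y ≤ m
      · rw [if_pos hcc, if_pos (by omega)]
      · rw [if_neg hcc, if_neg (by omega)]

theorem row_dsum (r : Int × Int × Int × Int) (x i : ℕ) :
    (∑ j ∈ Finset.range (x+1), dmark r i j) =
      ((if i = pyIdx1001 r.2.1 then (1:Int) else 0) - (if i = pyIdx1001 r.2.2.2 then 1 else 0)) *
        phiX r x := by
  unfold dmark phiX
  by_cases h1 : i = pyIdx1001 r.2.1 <;> by_cases h2 : i = pyIdx1001 r.2.2.2
  · have h12 : pyIdx1001 r.2.1 = pyIdx1001 r.2.2.2 := by rw [← h1, ← h2]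
    simp [h1, h2, h12, Finset.sum_sub_distrib, Finset.sum_add_distrib, pvSum_ite_eq_range,
      Nat.lt_succ_iff]
    try ring
  · have h12 : ¬ pyIdx1001 r.2.1 = pyIdx1001 r.2.2.2 := fun hh => h2 (h1.trans hh)
    simp [h1, h2, h12, Finset.sum_sub_distrib, Finset.sum_add_distrib, pvSum_ite_eq_range,
      Nat.lt_succ_iff]
    try ring
  · have h12 : ¬ pyIdx1001 r.2.2.2 = pyIdx1001 r.2.1 := fun hh => h1 (h2.trans hh)
    simp [h1, h2, h12, Finset.sum_sub_distrib, Finset.sum_add_distrib, pvSum_ite_eq_range,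
      Nat.lt_succ_iff]
    try ring
  · simp [h1, h2, Finset.sum_sub_distrib, Finset.sum_add_distrib, pvSum_ite_eq_range,
      Nat.lt_succ_iff]
    try ring

theorem dsum (rects : List (Int × Int × Int × Int)) (x y : ℕ) :
    (∑ i ∈ Finset.range (y+1), ∑ j ∈ Finset.range (x+1), fMark rects i j) = Cov rects x y := by
  induction rects with
  | nil => simp [fMark, Cov]
  | cons r t ih =>
    have hsplit : ∀ i j : ℕ, fMark (r::t) i j = dmark r i j + fMark t i j := fun i j => by
      simp [fMark]
    simp only [hsplit, Finset.sum_add_distrib]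
    rw [ih]
    have hhead : (∑ i ∈ Finset.range (y+1), ∑ j ∈ Finset.range (x+1), dmark r i j) =
        phiX r x * phiY r y := by
      have hr : ∀ i, (∑ j ∈ Finset.range (x+1), dmark r i j) =
          ((if i = pyIdx1001 r.2.1 then (1:Int) else 0) -
            (if i = pyIdx1001 r.2.2.2 then 1 else 0)) * phiX r x := row_dsum r x
      simp only [hr]
      rw [← Finset.sum_mul]
      have hsy : (∑ i ∈ Finset.range (y+1), ((if i = pyIdx1001 r.2.1 then (1:Int) else 0) -
          (if i = pyIdx1001 r.2.2.2 then 1 else 0))) = phiY r y := by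
        rw [Finset.sum_sub_distrib, pvSum_ite_eq_range, pvSum_ite_eq_range]
        unfold phiY
        simp [Nat.lt_succ_iff]
      rw [hsy]; ring
    rw [hhead]
    simp only [Cov, List.map_cons, List.sum_cons]

theorem sum_fMark_row_zero : ∀ (rects : List (Int × Int × Int × Int)), Bnd rects → ∀ y : ℕ,
    (∑ j ∈ Finset.range (1000+1), fMark rects y j) = 0 := by
  intro rects
  induction rects with
  | nil => intro _ y; simp [fMark]
  | cons r t ih =>
    intro hb y
    have hbr := hb r (List.mem_cons_self ..)
    have hbt : Bnd t := fun a ha => hb a (List.mem_cons_of_mem _ ha)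
    have hsplit : ∀ j : ℕ, fMark (r::t) y j = dmark r y j + fMark t y j := fun j => by
      simp [fMark]
    simp only [hsplit, Finset.sum_add_distrib]
    rw [ih hbt y, row_dsum r 1000 y]
    have hz : phiX r 1000 = 0 := by
      unfold phiX
      rw [if_pos (by omega), if_pos (by omega)]
      ring
    rw [hz]; ring

def fP1f (rects : List (Int × Int × Int × Int)) (y x : ℕ) : Int :=
  if y ≤ 999 then pref (fMark rects) y x else fMark rects y x
def FA (rects : List (Int × Int × Int × Int)) (y x : ℕ) : Int :=
  if x ≤ 999 ∧ y ≤ 1000 then colsum (fP1f rects) y x else fP1f rects y x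

theorem A_grid (rects : List (Int × Int × Int × Int)) (hb : Bnd rects) :
    GEq (aPass2 (aPass1 (aMark rects))) (FA rects) := by
  have h0 : GEq (Array.replicate 1001 (Array.replicate 1001 (0:Int))) (fun _ _ => 0) := by
    refine ⟨by simp, fun y hy => ?_⟩
    rw [pvGet!_replicate _ _ _ hy]
    exact ⟨by simp, fun x hx => pvGet!_replicate _ _ _ hx⟩
  have hmark : GEq (aMark rects) (fMark rects) := by
    have hmf := mark_fold rects hb _ _ h0
    refine GEq_congr _ _ _ hmf (fun y x _ _ => ?_)
    beta_reduce
    ring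
  have hp1 : GEq (aPass1 (aMark rects)) (fP1f rects) := by
    have hh := pass1_outer _ _ hmark 1000 (le_refl _)
    rw [show (((1000:ℕ)):Int) = (1000:Int) by norm_num] at hh
    refine GEq_congr _ _ _ hh (fun y x hy hx => ?_)
    beta_reduce
    unfold fP1f
    by_cases h : y ≤ 999
    · rw [if_pos (by omega), if_pos h]
    · rw [if_neg (by omega), if_neg h]
  have hh := pass2_outer _ _ hp1 1000 (le_refl _)
  rw [show (((1000:ℕ)):Int)+1 = (1001:Int) by norm_num] at hh
  refine GEq_congr _ _ _ hh (fun y x hy hx => ?_)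
  beta_reduce
  unfold FA
  by_cases h : x ≤ 999 ∧ y ≤ 1000
  · rw [if_pos h]
  · rw [if_neg h]

theorem cell_interior (rects : List (Int × Int × Int × Int)) (x y : ℕ)
    (hx : x ≤ 999) (hy : y ≤ 999) : FA rects y x = Cov rects x y := by
  unfold FA
  rw [if_pos ⟨hx, by omega⟩]
  unfold colsum
  rw [Finset.sum_congr rfl (fun i hi => show fP1f rects i x = ∑ j ∈ Finset.range (x+1), fMark rects i j by
    have hi' : i ≤ y := Nat.lt_succ_iff.mp (Finset.mem_range.mp hi)
    unfold fP1f pref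
    rw [if_pos (by omega)])]
  exact dsum rects x y

theorem cell_col (rects : List (Int × Int × Int × Int)) (hb : Bnd rects) (y : ℕ)
    (hy : y ≤ 999) : FA rects y 1000 = 0 := by
  unfold FA
  rw [if_neg (by omega)]
  unfold fP1f
  rw [if_pos hy]
  unfold pref
  exact sum_fMark_row_zero rects hb y

set_option maxHeartbeats 3200000 in
theorem rect_row1000 (r : Int × Int × Int × Int)
    (hbr : pyIdx1001 r.1 ≤ 1000 ∧ pyIdx1001 r.2.1 ≤ 1000 ∧ pyIdx1001 r.2.2.1 ≤ 1000 ∧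
      pyIdx1001 r.2.2.2 ≤ 1000) (x : ℕ) (hx : x ≤ 999) :
    phiX r x * phiY r 999 + dmark r 1000 x = if x = 0 then 0 else phiX r (x-1) * phiY r 999 := by
  obtain ⟨b1, b2, b3, b4⟩ := hbr
  unfold phiX phiY dmark
  split_ifs <;> omega

theorem covrow_sum : ∀ (rects : List (Int × Int × Int × Int)), Bnd rects → ∀ x : ℕ, x ≤ 999 →
    Cov rects x 999 + fMark rects 1000 x = if x = 0 then 0 else Cov rects (x-1) 999 := by
  intro rects
  induction rects with
  | nil =>
    intro _ x hx
    simp only [Cov, fMark, List.map_nil, List.sum_nil]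
    split_ifs <;> ring
  | cons r t ih =>
    intro hb x hx
    have hbr := hb r (List.mem_cons_self ..)
    have hbt : Bnd t := fun a ha => hb a (List.mem_cons_of_mem _ ha)
    simp only [Cov, fMark, List.map_cons, List.sum_cons]
    have hrt := rect_row1000 r hbr x hx
    have hih := ih hbt x hx
    simp only [Cov, fMark] at hih
    split_ifs at hrt hih ⊢ <;> omega

set_option maxHeartbeats 1600000 in
theorem rect_corner (r : Int × Int × Int × Int)
    (hbr : pyIdx1001 r.1 ≤ 1000 ∧ pyIdx1001 r.2.1 ≤ 1000 ∧ pyIdx1001 r.2.2.1 ≤ 1000 ∧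
      pyIdx1001 r.2.2.2 ≤ 1000) :
    dmark r 1000 1000 = phiX r 999 * phiY r 999 := by
  obtain ⟨b1, b2, b3, b4⟩ := hbr
  unfold phiX phiY dmark
  split_ifs <;> omega

theorem fMark_corner : ∀ (rects : List (Int × Int × Int × Int)), Bnd rects →
    fMark rects 1000 1000 = Cov rects 999 999 := by
  intro rects
  induction rects with
  | nil => intro _; simp [fMark, Cov]
  | cons r t ih =>
    intro hb
    have hbr := hb r (List.mem_cons_self ..)
    have hbt : Bnd t := fun a ha => hb a (List.mem_cons_of_mem _ ha)
    simp only [fMark, Cov, List.map_cons, List.sum_cons]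
    rw [rect_corner r hbr]
    have := ih hbt
    simp only [fMark, Cov] at this
    rw [this]

theorem cell_row (rects : List (Int × Int × Int × Int)) (hb : Bnd rects) (x : ℕ)
    (hx : x ≤ 999) : FA rects 1000 x = if x = 0 then 0 else Cov rects (x-1) 999 := by
  unfold FA
  rw [if_pos ⟨hx, by omega⟩]
  unfold colsum
  rw [Finset.sum_range_succ]
  have h1 : (∑ i ∈ Finset.range 1000, fP1f rects i x) = Cov rects x 999 := by
    rw [Finset.sum_congr rfl (fun i hi => show fP1f rects i x = ∑ j ∈ Finset.range (x+1), fMark rects i j by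
      have hi' : i < 1000 := Finset.mem_range.mp hi
      unfold fP1f pref
      rw [if_pos (by omega)])]
    rw [show (1000:ℕ) = 999+1 from rfl]
    exact dsum rects x 999
  have h2 : fP1f rects 1000 x = fMark rects 1000 x := by
    unfold fP1f
    rw [if_neg (by omega)]
  rw [h1, h2]
  exact covrow_sum rects hb x hx

theorem cell_corner (rects : List (Int × Int × Int × Int)) (hb : Bnd rects) :
    FA rects 1000 1000 = Cov rects 999 999 := by
  unfold FA
  rw [if_neg (by omega)]
  unfold fP1f
  rw [if_neg (by omega)]
  exact fMark_corner rects hb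

theorem max_getD_spec (l : List Int) (h : l ≠ []) :
    (PySem.List.max? l (fun v => v)).getD 0 ∈ l ∧
      ∀ v ∈ l, v ≤ (PySem.List.max? l (fun v => v)).getD 0 := by
  obtain ⟨m, hm⟩ : ∃ m, PySem.List.max? l (fun v => v) = some m := by
    cases hc : PySem.List.max? l (fun v => v) with
    | none => exact absurd ((PySem.List.max?_eq_none_iff _ _).mp hc) h
    | some m => exact ⟨m, rfl⟩
  rw [hm]
  refine ⟨PySem.List.max?_mem hm, fun v hv => ?_⟩
  simpa using PySem.List.max?_isMax hm v hv

theorem A_isAns (n : Int) (rects : List (Int × Int × Int × Int)) (hb : Bnd rects) :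
    IsAns rects (solve n rects) := by
  have hg := A_grid rects hb
  have hGs : (aPass2 (aPass1 (aMark rects))).size = 1001 := hg.1
  have hlen : (aPass2 (aPass1 (aMark rects))).toList.length = 1001 := by
    rw [Array.length_toList, hGs]
  have hrlen2 : ∀ y : ℕ, y < 1001 → ((aPass2 (aPass1 (aMark rects)))[y]!).toList.length = 1001 :=
    fun y hy => by rw [Array.length_toList]; exact (hg.2 y hy).1
  have hrowne : ∀ y : ℕ, y < 1001 → ((aPass2 (aPass1 (aMark rects)))[y]!).toList ≠ [] := by
    intro y hy hc
    have := hrlen2 y hy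
    rw [hc] at this
    simp at this
  have hgetl : ∀ (y x : ℕ) (hy : y < 1001) (hx : x < 1001)
      (hxl : x < ((aPass2 (aPass1 (aMark rects)))[y]!).toList.length),
      ((aPass2 (aPass1 (aMark rects)))[y]!).toList[x] = FA rects y x := by
    intro y x hy hx hxl
    rw [Array.getElem_toList, ← GEq_get _ _ hg y x hy hx]
    exact (getElem!_pos ((aPass2 (aPass1 (aMark rects)))[y]!) x
      (by rwa [Array.length_toList] at hxl)).symm
  have hvmem : ∀ (y x : ℕ), y < 1001 → x < 1001 →
      FA rects y x ∈ ((aPass2 (aPass1 (aMark rects)))[y]!).toList := by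
    intro y x hy hx
    rw [List.mem_iff_getElem]
    exact ⟨x, by rw [hrlen2 y hy]; omega, hgetl y x hy hx _⟩
  have hvals : ∀ (y : ℕ), y < 1001 → ∀ v ∈ ((aPass2 (aPass1 (aMark rects)))[y]!).toList,
      ∃ x : ℕ, x < 1001 ∧ v = FA rects y x := by
    intro y hy v hv
    obtain ⟨x, hxl, hxe⟩ := List.mem_iff_getElem.mp hv
    have hx : x < 1001 := by rwa [hrlen2 y hy] at hxl
    exact ⟨x, hx, by rw [← hxe, hgetl y x hy hx hxl]⟩
  have hrowsne : (aPass2 (aPass1 (aMark rects))).toList.map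
      (fun row => (PySem.List.max? row.toList (fun v => v)).getD 0) ≠ [] := by
    intro hc
    have hl : ((aPass2 (aPass1 (aMark rects))).toList.map
      (fun row => (PySem.List.max? row.toList (fun v => v)).getD 0)).length = 1001 := by
      rw [List.length_map, hlen]
    rw [hc] at hl
    simp at hl
  have hrow_in : ∀ y : ℕ, y < 1001 →
      (PySem.List.max? ((aPass2 (aPass1 (aMark rects)))[y]!).toList (fun v => v)).getD 0 ∈
        (aPass2 (aPass1 (aMark rects))).toList.map
          (fun row => (PySem.List.max? row.toList (fun v => v)).getD 0) := by
    intro y hy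
    refine List.mem_map.mpr ⟨(aPass2 (aPass1 (aMark rects)))[y]!, ?_, rfl⟩
    rw [getElem!_pos (aPass2 (aPass1 (aMark rects))) y (by rw [hGs]; omega)]
    exact Array.getElem_mem_toList _
  obtain ⟨hmem, hub⟩ := max_getD_spec _ hrowsne
  have hsolve : solve n rects = (PySem.List.max? ((aPass2 (aPass1 (aMark rects))).toList.map
      (fun row => (PySem.List.max? row.toList (fun v => v)).getD 0)) (fun v => v)).getD 0 := by
    unfold solve aMax
    rfl
  -- a row's max is ≤ the final result
  have hrow_le : ∀ (y : ℕ), y < 1001 →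
      (PySem.List.max? ((aPass2 (aPass1 (aMark rects)))[y]!).toList (fun v => v)).getD 0 ≤
        solve n rects := by
    intro y hy
    rw [hsolve]
    exact hub _ (hrow_in y hy)
  refine ⟨?_, ?_, ?_⟩
  · -- 0 ≤ solve
    have hz : (0:Int) ∈ ((aPass2 (aPass1 (aMark rects)))[0]!).toList := by
      have := hvmem 0 1000 (by norm_num) (by norm_num)
      rwa [cell_col rects hb 0 (by norm_num)] at this
    have h5 := (max_getD_spec _ (hrowne 0 (by norm_num))).2 0 hz
    have h6 := hrow_le 0 (by norm_num)
    omega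
  · -- every interior coverage is ≤ solve
    intro x y hx hy
    have h1 : Cov rects x y = FA rects y x := (cell_interior rects x y (by omega) (by omega)).symm
    have h2 := (max_getD_spec _ (hrowne y (by omega))).2 _ (hvmem y x (by omega) (by omega))
    have h3 := hrow_le y (by omega)
    omega
  · -- the result is 0 or an interior coverage value
    rw [hsolve]
    obtain ⟨rowv, hrowmem, hres⟩ := List.mem_map.mp hmem
    obtain ⟨y, hylen, hye⟩ := Array.mem_iff_getElem.mp (Array.mem_def.mpr hrowmem)
    have hy : y < 1001 := by rwa [hGs] at hylen
    have hrow_eq : rowv = (aPass2 (aPass1 (aMark rects)))[y]! := by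
      rw [getElem!_pos (aPass2 (aPass1 (aMark rects))) y (by rw [hGs]; omega), hye]
    rw [hrow_eq] at hres
    have hspec := max_getD_spec _ (hrowne y hy)
    obtain ⟨x, hx, hxe⟩ := hvals y hy _ hspec.1
    have hresx : (PySem.List.max? ((aPass2 (aPass1 (aMark rects))).toList.map
        (fun row => (PySem.List.max? row.toList (fun v => v)).getD 0)) (fun v => v)).getD 0 =
        FA rects y x := by rw [← hres, hxe]
    rw [hresx]
    by_cases hy9 : y ≤ 999 <;> by_cases hx9 : x ≤ 999
    · exact Or.inr ⟨x, y, by omega, by omega, cell_interior rects x y hx9 hy9⟩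
    · have hx1000 : x = 1000 := by omega
      subst hx1000
      exact Or.inl (cell_col rects hb y hy9)
    · have hy1000 : y = 1000 := by omega
      subst hy1000
      rw [cell_row rects hb x hx9]
      by_cases hx0 : x = 0
      · rw [if_pos hx0]
        exact Or.inl rfl
      · rw [if_neg hx0]
        exact Or.inr ⟨x - 1, 999, by omega, by omega, rfl⟩
    · have hy1000 : y = 1000 := by omega
      have hx1000 : x = 1000 := by omega
      subst hy1000; subst hx1000
      rw [cell_corner rects hb]
      exact Or.inr ⟨999, 999, by omega, by omega, rfl⟩

theorem solve_eq_alt (n : Int) (rects : List (Int × Int × Int × Int))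
    (hpre : Pre_solve n rects) : solve n rects = solve_alt n rects := by
  have hb := pre_bnd n rects hpre
  exact IsAns_unique rects _ _ (A_isAns n rects hb) (B_isAns n rects hb)

-- ===== VERDICT (by name: the statement is the Claim_ definition above) =====
theorem solve_spec : Claim_equal_solve := by
  intro n rects _ hpre
  unfold Spec_solve
  exact solve_eq_alt n rects hpre
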